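-- pv_equiv track=rewrite | github.com/FixingMyHinglish/mech-interp-for-codeswitching | experiments/exp2_switch_point_activations/run.py | _forward_fill_labels
-- ===== SOURCE A (Python) =====
-- def _forward_fill_labels(raw_labels: list[str]) -> list[str]:
--     labels: list[str] = []
--     last_known = "other"
--     for label in raw_labels:
--         clean = label if label in {"english", "target"} else "other"
--         if clean != "other":
--             last_known = clean
--             labels.append(clean)
--         else:
--             labels.append(last_known if last_known != "other" else "other")
--     return labels
-- ===== SOURCE B (Python) =====
-- from bisect import bisect_right
--
-- def _forward_fill_labels(raw_labels: list[str]) -> list[str]: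
--     # Gather-then-query: precompute the sorted index list of special labels,
--     # then answer each position independently by binary search (no carried state).
--     anchors = [i for i, lab in enumerate(raw_labels) if lab in ("english", "target")]
--     out = []
--     for i in range(len(raw_labels)):
--         k = bisect_right(anchors, i)
--         out.append(raw_labels[anchors[k - 1]] if k else "other")
--     return out
-- ===== Notes on version B (the rewrite author's own statement) =====
-- stated objective: alternative
-- what changed: Replaced A's single stateful forward-fill loop by a gather-then-query algorithm: precompute the sorted list of special-label positions, then answer each position independently via bisect_right binary search, with no carried state.
import Mathlib
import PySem

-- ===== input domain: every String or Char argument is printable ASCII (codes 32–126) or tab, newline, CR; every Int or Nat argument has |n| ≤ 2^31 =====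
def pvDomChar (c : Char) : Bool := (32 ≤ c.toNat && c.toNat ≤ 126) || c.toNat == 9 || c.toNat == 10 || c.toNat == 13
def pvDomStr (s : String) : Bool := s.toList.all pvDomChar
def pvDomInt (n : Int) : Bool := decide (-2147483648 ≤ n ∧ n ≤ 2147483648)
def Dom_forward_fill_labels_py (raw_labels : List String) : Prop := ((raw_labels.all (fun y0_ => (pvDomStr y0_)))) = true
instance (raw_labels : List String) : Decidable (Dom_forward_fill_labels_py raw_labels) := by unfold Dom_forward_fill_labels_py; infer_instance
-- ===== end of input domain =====

-- B replaces A's single stateful forward-fill loop by gather-then-query: it precomputes the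
-- sorted list of special-label positions and answers every position independently by binary
-- search over it (objective: alternative algorithm, no carried state).

-- ===== PORT A =====
-- one loop with state (labels, last_known), exactly A's branches
def forward_fill_labels_py (raw_labels : List String) : List String :=
  (raw_labels.foldl
    (fun (st : List String × String) label =>
      let clean := if label = "english" ∨ label = "target" then label else "other"
      if clean ≠ "other" then
        (st.1 ++ [clean], clean)
      else
        (st.1 ++ [if st.2 ≠ "other" then st.2 else "other"], st.2))
    ([], "other")).1

-- ===== PORT B =====
-- anchors = [i for i, lab in enumerate(raw_labels) if lab in ("english","target")]
-- (Python's enumerate ported with Nat indices via zipIdx: all indices are nonnegative, so exact)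
def ffAnchors (raw_labels : List String) : List Nat :=
  (raw_labels.zipIdx.filter (fun p => decide (p.1 = "english" ∨ p.1 = "target"))).map Prod.snd

-- bisect.bisect_right(xs, i) on the sorted ascending list xs: the number of elements ≤ i;
-- exact here because ffAnchors is strictly increasing
def ffBisectRight (xs : List Nat) (i : Nat) : Nat :=
  (xs.takeWhile (fun a => decide (a ≤ i))).length

-- loop over range(len(raw_labels)); raw_labels[anchors[k-1]] ported with getD, exact because
-- 0 < k ≤ anchors.length and every anchor is a valid index of raw_labels
def forward_fill_labels_py_alt (raw_labels : List String) : List String :=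
  let anchors := ffAnchors raw_labels
  (List.range raw_labels.length).map (fun i =>
    let k := ffBisectRight anchors i
    if k = 0 then "other" else raw_labels.getD (anchors.getD (k - 1) 0) "other")

-- ===== PRECONDITION & SPEC =====
def Spec_forward_fill_labels_py (raw_labels : List String) (out : List String) : Prop := out = forward_fill_labels_py_alt raw_labels
instance (raw_labels : List String) (out : List String) : Decidable (Spec_forward_fill_labels_py raw_labels out) := by unfold Spec_forward_fill_labels_py; infer_instance

-- ===== CLAIM (what is proved, stated in full; the proofs are below) =====
def Claim_equal_forward_fill_labels_py : Prop := ∀ (raw_labels : List String), Dom_forward_fill_labels_py raw_labels → Spec_forward_fill_labels_py raw_labels (forward_fill_labels_py raw_labels)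

-- ===== LEMMAS AND PROOFS =====

-- the carry ("last_known") after A's loop, expressed through the anchors
def ffCarry (raw : List String) : String :=
  let anchors := ffAnchors raw
  if anchors.length = 0 then "other"
  else raw.getD (anchors.getD (anchors.length - 1) 0) "other"

lemma ffAnchors_append_singleton (xs : List String) (x : String) :
    ffAnchors (xs ++ [x]) =
      ffAnchors xs ++ (if x = "english" ∨ x = "target" then [xs.length] else []) := by
  unfold ffAnchors
  rw [List.zipIdx_append, List.filter_append, List.map_append]
  by_cases h : x = "english" ∨ x = "target" <;> simp [h]

lemma ffAnchors_lt (xs : List String) : ∀ j ∈ ffAnchors xs, j < xs.length := by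
  intro j hj
  unfold ffAnchors at hj
  simp only [List.mem_map, List.mem_filter] at hj
  obtain ⟨p, ⟨hp, _⟩, rfl⟩ := hj
  simpa using List.snd_lt_add_of_mem_zipIdx hp

lemma takeWhile_append_singleton_neg {α : Type} {p : α → Bool} {l : List α} {a : α}
    (h : p a = false) : (l ++ [a]).takeWhile p = l.takeWhile p := by
  induction l with
  | nil => simp [List.takeWhile, h]
  | cons y ys ih =>
    simp only [List.cons_append, List.takeWhile]
    cases p y <;> simp [ih]

lemma ffBisectRight_le (xs : List Nat) (i : Nat) : ffBisectRight xs i ≤ xs.length :=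
  (List.takeWhile_sublist _).length_le

-- value of B at a position i < xs.length is unchanged by appending one more element
lemma ffB_stable (xs : List String) (x : String) (i : Nat) (hi : i < xs.length) :
    (let anchors := ffAnchors (xs ++ [x])
     let k := ffBisectRight anchors i
     if k = 0 then "other" else (xs ++ [x]).getD (anchors.getD (k - 1) 0) "other")
    = (let anchors := ffAnchors xs
       let k := ffBisectRight anchors i
       if k = 0 then "other" else xs.getD (anchors.getD (k - 1) 0) "other") := by
  simp only [ffAnchors_append_singleton]
  have hk : ffBisectRight (ffAnchors xs ++ (if x = "english" ∨ x = "target" then [xs.length] else [])) i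
      = ffBisectRight (ffAnchors xs) i := by
    by_cases h : x = "english" ∨ x = "target"
    · simp only [h, if_true]
      unfold ffBisectRight
      rw [takeWhile_append_singleton_neg]
      simp; omega
    · simp [h]
  rw [hk]
  set k := ffBisectRight (ffAnchors xs) i with hkdef
  by_cases h0 : k = 0
  · simp [h0]
  · have hklen : k ≤ (ffAnchors xs).length := ffBisectRight_le _ _
    have hlt : k - 1 < (ffAnchors xs).length := by omega
    have hg1 : (ffAnchors xs ++ (if x = "english" ∨ x = "target" then [xs.length] else [])).getD (k-1) 0
        = (ffAnchors xs).getD (k-1) 0 := List.getD_append _ _ _ _ hlt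
    have hmem : (ffAnchors xs).getD (k-1) 0 ∈ ffAnchors xs := by
      rw [List.getD_eq_getElem _ _ hlt]; exact List.getElem_mem hlt
    have hlt2 : (ffAnchors xs).getD (k-1) 0 < xs.length := ffAnchors_lt xs _ hmem
    simp only [h0, if_false, hg1]
    rw [List.getD_append _ _ _ _ hlt2]

-- value of B at the new last position equals (if special then x else ffCarry xs)
lemma ffB_last (xs : List String) (x : String) :
    (let anchors := ffAnchors (xs ++ [x])
     let k := ffBisectRight anchors xs.length
     if k = 0 then "other" else (xs ++ [x]).getD (anchors.getD (k - 1) 0) "other")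
    = if x = "english" ∨ x = "target" then x else ffCarry xs := by
  have hall : ∀ j ∈ ffAnchors (xs ++ [x]), (fun a => decide (a ≤ xs.length)) j = true := by
    intro j hj
    have := ffAnchors_lt (xs ++ [x]) j hj
    simp at this ⊢; omega
  have hk : ffBisectRight (ffAnchors (xs ++ [x])) xs.length = (ffAnchors (xs ++ [x])).length := by
    unfold ffBisectRight
    rw [List.takeWhile_eq_self_iff.mpr hall]
  simp only []
  rw [hk]
  by_cases h : x = "english" ∨ x = "target"
  · have ha : ffAnchors (xs ++ [x]) = ffAnchors xs ++ [xs.length] := by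
      rw [ffAnchors_append_singleton]; simp [h]
    rw [ha]
    have h0 : (ffAnchors xs ++ [xs.length]).length ≠ 0 := by simp
    rw [if_neg h0]
    have hg : (ffAnchors xs ++ [xs.length]).getD ((ffAnchors xs ++ [xs.length]).length - 1) 0 = xs.length := by
      simp [List.getD]
    rw [hg]
    simp [List.getD, h]
  · have ha : ffAnchors (xs ++ [x]) = ffAnchors xs := by
      rw [ffAnchors_append_singleton]; simp [h]
    rw [ha]
    unfold ffCarry
    simp only [h, if_false]
    by_cases h0 : (ffAnchors xs).length = 0
    · simp [h0]
    · have hlt : (ffAnchors xs).length - 1 < (ffAnchors xs).length := by omega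
      have hg1 : (ffAnchors xs).getD ((ffAnchors xs).length - 1) 0 ∈ ffAnchors xs := by
        rw [List.getD_eq_getElem _ _ hlt]; exact List.getElem_mem hlt
      have hlt2 := ffAnchors_lt xs _ hg1
      rw [if_neg h0, if_neg h0, List.getD_append _ _ _ _ hlt2]

lemma ffCarry_append_singleton (xs : List String) (x : String) :
    ffCarry (xs ++ [x]) = if x = "english" ∨ x = "target" then x else ffCarry xs := by
  unfold ffCarry
  simp only [ffAnchors_append_singleton]
  by_cases h : x = "english" ∨ x = "target"
  · simp only [h, if_true, List.length_append, List.length_singleton]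
    have h0 : (ffAnchors xs).length + 1 ≠ 0 := by omega
    rw [if_neg h0]
    have hg : (ffAnchors xs ++ [xs.length]).getD ((ffAnchors xs).length + 1 - 1) 0 = xs.length := by
      simp [List.getD]
    rw [hg]; simp [List.getD]
  · simp only [h, if_false, List.append_nil]
    by_cases h0 : (ffAnchors xs).length = 0
    · simp [h0]
    · have hlt : (ffAnchors xs).length - 1 < (ffAnchors xs).length := by omega
      have hg1 : (ffAnchors xs).getD ((ffAnchors xs).length - 1) 0 ∈ ffAnchors xs := by
        rw [List.getD_eq_getElem _ _ hlt]; exact List.getElem_mem hlt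
      have hlt2 := ffAnchors_lt xs _ hg1
      rw [if_neg h0, if_neg h0, List.getD_append _ _ _ _ hlt2]

-- main invariant: A's fold computes (B's output, carry)
lemma ff_main (raw : List String) :
    raw.foldl
      (fun (st : List String × String) label =>
        let clean := if label = "english" ∨ label = "target" then label else "other"
        if clean ≠ "other" then
          (st.1 ++ [clean], clean)
        else
          (st.1 ++ [if st.2 ≠ "other" then st.2 else "other"], st.2))
      ([], "other")
    = (forward_fill_labels_py_alt raw, ffCarry raw) := by
  induction raw using List.reverseRecOn with
  | nil => simp [forward_fill_labels_py_alt, ffCarry, ffAnchors, ffBisectRight]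
  | append_singleton xs x ih =>
    rw [List.foldl_append, ih, List.foldl_cons, List.foldl_nil]
    have hB : forward_fill_labels_py_alt (xs ++ [x])
        = forward_fill_labels_py_alt xs
          ++ [if x = "english" ∨ x = "target" then x else ffCarry xs] := by
      unfold forward_fill_labels_py_alt
      simp only [List.length_append, List.length_singleton, List.range_succ, List.map_append,
        List.map_cons, List.map_nil]
      congr 1
      · exact List.map_congr_left (fun i hi => ffB_stable xs x i (List.mem_range.mp hi))
      · simpa using congrArg (fun s => [s]) (ffB_last xs x)
    by_cases h : x = "english" ∨ x = "target"
    · have hne : x ≠ "other" := by rcases h with h | h <;> simp [h]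
      simp only [h, if_true, ne_eq, hne, not_false_iff]
      rw [hB, ffCarry_append_singleton]
      simp [h]
    · simp only [h, if_false, ne_eq, not_true, ite_not]
      rw [hB, ffCarry_append_singleton]
      simp only [h, if_false]
      by_cases hc : ffCarry xs = "other" <;> simp [hc]

-- ===== VERDICT (by name: the statement is the Claim_ definition above) =====
theorem forward_fill_labels_py_spec : Claim_equal_forward_fill_labels_py := by
  intro raw _
  unfold Spec_forward_fill_labels_py forward_fill_labels_py
  rw [ff_main]
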